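-- pv_equiv track=rewrite | github.com/Tehedor/MLOps_actions_v2 | test/generate_variants_diagram.py | mermaid_rich_label
-- ===== SOURCE A (Python) =====
-- def mermaid_rich_label(text: str) -> str:
-- 	parts = text.split("\n")
-- 	if not parts:
-- 		return ""
-- 	head = parts[0].replace('"', "'")
-- 	tail = [p.replace('"', "'") for p in parts[1:]]
-- 	first = f"<b><span style='font-size:16px'>{head}</span></b>"
-- 	if not tail:
-- 		return first
-- 	return first + "<br/>" + "<br/>".join(tail)
-- ===== SOURCE B (Python) =====
-- def mermaid_rich_label(text: str) -> str:
--     # Single character-level pass: no split/join of lines at all.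
--     out = ["<b><span style='font-size:16px'>"]
--     styling = True
--     for ch in text:
--         if ch == "\n":
--             if styling:
--                 out.append("</span></b>")
--                 styling = False
--             out.append("<br/>")
--         elif ch == '"':
--             out.append("'")
--         else:
--             out.append(ch)
--     if styling:
--         out.append("</span></b>")
--     return "".join(out)
-- ===== Notes on version B (the rewrite author's own statement) =====
-- stated objective: alternative
-- what changed: Replaces the split-on-newline / per-line replace / join pipeline by a single character-level state-machine pass that emits the replacement or the <br/> separator per character and closes the styled span at the first newline.
import Mathlib
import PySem

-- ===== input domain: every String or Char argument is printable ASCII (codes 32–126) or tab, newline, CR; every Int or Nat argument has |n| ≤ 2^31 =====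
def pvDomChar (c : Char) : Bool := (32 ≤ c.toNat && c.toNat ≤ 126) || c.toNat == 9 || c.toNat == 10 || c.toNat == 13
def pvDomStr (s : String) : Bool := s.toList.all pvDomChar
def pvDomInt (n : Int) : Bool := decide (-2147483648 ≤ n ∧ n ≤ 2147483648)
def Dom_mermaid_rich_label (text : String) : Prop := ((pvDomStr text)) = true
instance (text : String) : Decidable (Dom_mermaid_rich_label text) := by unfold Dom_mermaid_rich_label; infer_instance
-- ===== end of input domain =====

-- B replaces the split/replace/join pipeline by one character-level state-machine pass; same output, alternative decomposition.

-- ===== PORT A =====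
def mermaid_rich_label (text : String) : String :=
  let parts := (PySem.Str.split? text "\n").getD []
  match parts with
  | [] => ""                                  -- 'if not parts: return ""'
  | p0 :: rest =>
    let head := PySem.Str.replace p0 "\"" "'"
    let tail := rest.map (fun p => PySem.Str.replace p "\"" "'")
    let first := "<b><span style='font-size:16px'>" ++ head ++ "</span></b>"
    if tail = [] then first
    else first ++ "<br/>" ++ PySem.Str.join "<br/>" tail

-- ===== PORT B =====
-- one step of the character loop: state = (chunks appended so far, styling flag)
def mrlStep (st : List String × Bool) (ch : Char) : List String × Bool :=
  if ch = '\n' then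
    ((if st.2 then st.1 ++ ["</span></b>"] else st.1) ++ ["<br/>"], false)
  else if ch = '"' then (st.1 ++ ["'"], st.2)
  else (st.1 ++ [String.ofList [ch]], st.2)

def mermaid_rich_label_alt (text : String) : String :=
  let st := text.toList.foldl mrlStep (["<b><span style='font-size:16px'>"], true)
  let out := if st.2 then st.1 ++ ["</span></b>"] else st.1
  PySem.Str.join "" out

-- ===== PRECONDITION & SPEC =====
def Spec_mermaid_rich_label (text : String) (out : String) : Prop := out = mermaid_rich_label_alt text
instance (text : String) (out : String) : Decidable (Spec_mermaid_rich_label text out) := by unfold Spec_mermaid_rich_label; infer_instance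

-- ===== CLAIM (what is proved, stated in full; the proofs are below) =====
def Claim_equal_mermaid_rich_label : Prop := ∀ (text : String), Dom_mermaid_rich_label text → Spec_mermaid_rich_label text (mermaid_rich_label text)

-- ===== LEMMAS AND PROOFS =====

-- proof-side vocabulary (used only below the claim block)
def mrlRepl (c : Char) : Char := if c = '"' then '\'' else c
def mrlEsc (c : Char) : List Char := if c = '\n' then "<br/>".toList else [mrlRepl c]
-- rendering of the text while the styling flag is still on
def mrlEsc1 : List Char → List Char
  | [] => "</span></b>".toList
  | c :: cs =>
    if c = '\n' then "</span></b>".toList ++ "<br/>".toList ++ cs.flatMap mrlEsc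
    else mrlRepl c :: mrlEsc1 cs
-- structural specification of text.split("\n")
def mrlSplit : List Char → List (List Char)
  | [] => [[]]
  | c :: cs => if c = '\n' then [] :: mrlSplit cs else (mrlSplit cs).modifyHead (c :: ·)

theorem mrlSplit_ne_nil (l : List Char) : mrlSplit l ≠ [] := by
  cases l with
  | nil => simp [mrlSplit]
  | cons c cs =>
    simp only [mrlSplit]
    split_ifs
    · simp
    · cases h : mrlSplit cs with
      | nil => exact absurd h (mrlSplit_ne_nil cs)
      | cons p t => simp

theorem mrl_join_nil_flatten (ps : List (List Char)) :
    PySem.Chars.join [] ps = ps.flatten := by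
  match ps with
  | [] => simp [PySem.Chars.join_nil]
  | [p] => simp [PySem.Chars.join_singleton]
  | p :: q :: t =>
    rw [PySem.Chars.join_cons_cons, mrl_join_nil_flatten (q :: t)]
    simp

theorem mrl_replace_go (l acc : List Char) (fuel : Nat) (h : l.length ≤ fuel) :
    PySem.Chars.replace.go ['"'] ['\''] fuel l acc = acc.reverse ++ l.map mrlRepl := by
  induction l generalizing fuel acc with
  | nil => cases fuel <;> simp [PySem.Chars.replace.go]
  | cons c cs ih =>
    cases fuel with
    | zero => simp at h
    | succ f =>
      have h' : cs.length ≤ f := by simpa using h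
      by_cases hc : c = '"'
      · subst hc
        have step : PySem.Chars.replace.go ['"'] ['\''] (f + 1) ('"' :: cs) acc =
            PySem.Chars.replace.go ['"'] ['\''] f cs ('\'' :: acc) := rfl
        rw [step, ih _ _ h']
        simp [mrlRepl]
      · have hb : ('"' == c) = false := beq_eq_false_iff_ne.mpr (fun h => hc h.symm)
        have step : PySem.Chars.replace.go ['"'] ['\''] (f + 1) (c :: cs) acc =
            PySem.Chars.replace.go ['"'] ['\''] f cs (c :: acc) := by
          rw [PySem.Chars.replace.go.eq_def]
          simp [List.isPrefixOf, hb]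
        rw [step, ih _ _ h']
        simp [mrlRepl, hc]

theorem mrl_replace (l : List Char) :
    PySem.Chars.replace l ['"'] ['\''] = l.map mrlRepl := by
  simp only [PySem.Chars.replace, List.isEmpty_cons, Bool.false_eq_true, if_false]
  simpa using mrl_replace_go l [] l.length le_rfl

theorem mrl_split_go (l cur : List Char) (acc : List (List Char)) (fuel : Nat)
    (h : l.length ≤ fuel) :
    PySem.Chars.splitOn.go ['\n'] fuel l cur acc =
      acc.reverse ++ (mrlSplit l).modifyHead (cur.reverse ++ ·) := by
  induction l generalizing fuel cur acc with
  | nil => cases fuel <;> simp [PySem.Chars.splitOn.go, mrlSplit]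
  | cons c cs ih =>
    cases fuel with
    | zero => simp at h
    | succ f =>
      have h' : cs.length ≤ f := by simpa using h
      by_cases hc : c = '\n'
      · subst hc
        have step : PySem.Chars.splitOn.go ['\n'] (f + 1) ('\n' :: cs) cur acc =
            PySem.Chars.splitOn.go ['\n'] f cs [] (cur.reverse :: acc) := rfl
        rw [step, ih [] _ _ h']
        cases hs : mrlSplit cs with
        | nil => exact absurd hs (mrlSplit_ne_nil cs)
        | cons p t => simp [mrlSplit, hs]
      · have hb : ('\n' == c) = false := beq_eq_false_iff_ne.mpr (fun h => hc h.symm)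
        have step : PySem.Chars.splitOn.go ['\n'] (f + 1) (c :: cs) cur acc =
            PySem.Chars.splitOn.go ['\n'] f cs (c :: cur) acc := by
          rw [PySem.Chars.splitOn.go.eq_def]
          simp [List.isPrefixOf, hb]
        rw [step, ih (c :: cur) _ _ h']
        simp only [mrlSplit, hc, if_false]
        cases hs : mrlSplit cs with
        | nil => exact absurd hs (mrlSplit_ne_nil cs)
        | cons p t => simp

theorem mrl_split (l : List Char) :
    PySem.Chars.splitOn l ['\n'] = mrlSplit l := by
  have h1 := mrl_split_go l [] [] (l.length + 1) (by omega)
  have h2 : (mrlSplit l).modifyHead (fun x => x) = mrlSplit l := by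
    cases hq : mrlSplit l <;> simp
  simpa [PySem.Chars.splitOn, h2] using h1

-- the two renderings agree once the styling flag is off
theorem mrl_render_rest (l : List Char) :
    PySem.Chars.join "<br/>".toList ((mrlSplit l).map (List.map mrlRepl)) =
      l.flatMap mrlEsc := by
  induction l with
  | nil => simp [mrlSplit, PySem.Chars.join_singleton]
  | cons c cs ih =>
    by_cases hc : c = '\n'
    · subst hc
      cases hs : mrlSplit cs with
      | nil => exact absurd hs (mrlSplit_ne_nil cs)
      | cons p t =>
        rw [hs] at ih
        have hsp : mrlSplit ('\n' :: cs) = [] :: p :: t := by simp [mrlSplit, hs]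
        rw [hsp]
        simp only [List.map_cons] at ih
        simp only [List.map_cons, List.map_nil, PySem.Chars.join_cons_cons,
          List.nil_append, ih]
        simp [mrlEsc]
    · cases hs : mrlSplit cs with
      | nil => exact absurd hs (mrlSplit_ne_nil cs)
      | cons p t =>
        rw [hs] at ih
        have hsp : mrlSplit (c :: cs) = (c :: p) :: t := by simp [mrlSplit, hc, hs]
        rw [hsp]
        simp only [List.map_cons] at ih ⊢
        cases t with
        | nil =>
          simp only [List.map_nil, PySem.Chars.join_singleton] at ih ⊢
          simp [← ih, mrlEsc, mrlRepl, hc]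
        | cons q t' =>
          simp only [List.map_cons, PySem.Chars.join_cons_cons] at ih ⊢
          simp [← ih, mrlEsc, mrlRepl, hc]

-- mrlEsc1 is what A produces from the split parts
theorem mrl_esc1_eq (l : List Char) :
    mrlEsc1 l =
      ((mrlSplit l).headI).map mrlRepl
        ++ "</span></b>".toList
        ++ (if (mrlSplit l).tail = [] then []
            else "<br/>".toList ++
              PySem.Chars.join "<br/>".toList (((mrlSplit l).tail).map (List.map mrlRepl))) := by
  induction l with
  | nil => simp [mrlSplit, mrlEsc1]
  | cons c cs ih =>
    by_cases hc : c = '\n'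
    · subst hc
      cases hs : mrlSplit cs with
      | nil => exact absurd hs (mrlSplit_ne_nil cs)
      | cons p t =>
        have hr := mrl_render_rest cs
        rw [hs] at hr
        have hsp : mrlSplit ('\n' :: cs) = [] :: p :: t := by simp [mrlSplit, hs]
        rw [hsp]
        simp only [mrlEsc1, if_pos rfl, List.headI, List.tail_cons]
        simp [← hr]
    · cases hs : mrlSplit cs with
      | nil => exact absurd hs (mrlSplit_ne_nil cs)
      | cons p t =>
        rw [hs] at ih
        have hsp : mrlSplit (c :: cs) = (c :: p) :: t := by simp [mrlSplit, hc, hs]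
        rw [hsp]
        simp only [mrlEsc1, hc, if_false, List.headI, List.tail_cons] at ih ⊢
        simp [ih, mrlRepl, hc]

-- flattened character content of B's chunk list
def mrlFlat (out : List String) : List Char := (out.map String.toList).flatten

theorem mrl_foldl_false (l : List Char) (out : List String) :
    (l.foldl mrlStep (out, false)).2 = false ∧
      mrlFlat ((l.foldl mrlStep (out, false)).1) = mrlFlat out ++ l.flatMap mrlEsc := by
  induction l generalizing out with
  | nil => simp
  | cons c cs ih =>
    by_cases hc : c = '\n'
    · subst hc
      have step : mrlStep (out, false) '\n' = (out ++ ["<br/>"], false) := by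
        simp [mrlStep]
      rw [List.foldl_cons, step]
      obtain ⟨h1, h2⟩ := ih (out ++ ["<br/>"])
      refine ⟨h1, ?_⟩
      rw [h2]
      simp [mrlFlat, mrlEsc]
    · by_cases hq : c = '"'
      · subst hq
        have step : mrlStep (out, false) '"' = (out ++ ["'"], false) := by
          simp [mrlStep]
        rw [List.foldl_cons, step]
        obtain ⟨h1, h2⟩ := ih (out ++ ["'"])
        refine ⟨h1, ?_⟩
        rw [h2]
        simp [mrlFlat, mrlEsc, mrlRepl]
      · have step : mrlStep (out, false) c = (out ++ [String.ofList [c]], false) := by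
          simp [mrlStep, hc, hq]
        rw [List.foldl_cons, step]
        obtain ⟨h1, h2⟩ := ih (out ++ [String.ofList [c]])
        refine ⟨h1, ?_⟩
        rw [h2]
        simp [mrlFlat, mrlEsc, mrlRepl, hq, hc]

theorem mrl_foldl_true (l : List Char) (out : List String) :
    mrlFlat (let st := l.foldl mrlStep (out, true);
             if st.2 then st.1 ++ ["</span></b>"] else st.1) =
      mrlFlat out ++ mrlEsc1 l := by
  induction l generalizing out with
  | nil => simp [mrlEsc1, mrlFlat]
  | cons c cs ih =>
    by_cases hc : c = '\n'
    · subst hc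
      have step : mrlStep (out, true) '\n' =
          (out ++ ["</span></b>"] ++ ["<br/>"], false) := by
        simp [mrlStep]
      simp only [List.foldl_cons, step]
      obtain ⟨h1, h2⟩ := mrl_foldl_false cs (out ++ ["</span></b>"] ++ ["<br/>"])
      simp only [h1, Bool.false_eq_true, if_false]
      rw [h2]
      simp [mrlFlat, mrlEsc1]
    · by_cases hq : c = '"'
      · subst hq
        have step : mrlStep (out, true) '"' = (out ++ ["'"], true) := by
          simp [mrlStep]
        simp only [List.foldl_cons, step]
        rw [ih (out ++ ["'"])]
        simp [mrlFlat, mrlEsc1, mrlRepl]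
      · have step : mrlStep (out, true) c = (out ++ [String.ofList [c]], true) := by
          simp [mrlStep, hc, hq]
        simp only [List.foldl_cons, step]
        rw [ih (out ++ [String.ofList [c]])]
        simp [mrlFlat, mrlEsc1, mrlRepl, hc, hq]

-- ===== VERDICT (by name: the statement is the Claim_ definition above) =====
theorem mermaid_rich_label_spec : Claim_equal_mermaid_rich_label := by
  intro text _
  unfold Spec_mermaid_rich_label mermaid_rich_label mermaid_rich_label_alt
  apply String.toList_injective
  have hsplit : (PySem.Str.split? text "\n").getD [] =
      (mrlSplit text.toList).map String.ofList := by
    simp [PySem.Str.split?, PySem.Chars.split?, mrl_split]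
  rw [hsplit]
  have hB : (PySem.Str.join ""
      (let st := text.toList.foldl mrlStep (["<b><span style='font-size:16px'>"], true);
       if st.2 then st.1 ++ ["</span></b>"] else st.1)).toList =
      "<b><span style='font-size:16px'>".toList ++ mrlEsc1 text.toList := by
    rw [PySem.Str.toList_join]
    have h0 : "".toList = ([] : List Char) := rfl
    rw [h0, mrl_join_nil_flatten]
    have := mrl_foldl_true text.toList ["<b><span style='font-size:16px'>"]
    simp only [mrlFlat] at this
    simpa [mrlFlat] using this
  rw [hB, mrl_esc1_eq text.toList]
  cases hs : mrlSplit text.toList with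
  | nil => exact absurd hs (mrlSplit_ne_nil text.toList)
  | cons p t =>
    simp only [hs, List.map_cons, List.headI, List.tail_cons]
    cases t with
    | nil =>
      simp [PySem.Str.toList_replace, mrl_replace]
    | cons q t' =>
      simp only [List.map_cons, List.map_eq_nil_iff, reduceCtorEq, if_false]
      simp [PySem.Str.toList_replace, PySem.Str.toList_join, mrl_replace,
        Function.comp, String.toList_ofList]
      congr 2
      apply List.map_congr_left
      intro x _
      simp [Function.comp, PySem.Str.toList_replace, mrl_replace, String.toList_ofList]
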